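-- pv_equiv track=rewrite | github.com/RostikRK/UCU | BasicsOfProgramming/FirstTerm/ThirdMiniProject/My_bot_player.py | slice_the_board
-- ===== SOURCE A (Python) =====
-- def slice_the_board(hei_m, wid_m, hei_f, wid_f, board_matr):
--     """
--     Slices the board on all possible slice which have the the same size as the figure
--     """
--     las_wid = wid_m-(wid_f-1)
--     las_hei = hei_m-(hei_f-1)
--     list_opt = []
--     for heigg in range(0, las_hei):
--         for widd in range(0, las_wid):
--             coo_lst = [heigg, widd]
--             slic_matrics = []
--             for sublist in board_matr[heigg:(heigg + hei_f)]:
--                 slic_matrics.append(sublist[widd:(widd + wid_f)])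
--             tuup = (coo_lst, slic_matrics)
--             list_opt.append(tuup)
--     return list_opt
-- ===== SOURCE B (Python) =====
-- def slice_the_board(hei_m, wid_m, hei_f, wid_f, board_matr):
--     """Two-pass version: precompute every horizontal window per row, then
--     assemble each hei_f x wid_f slice by picking column w of hei_f row-window lists."""
--     las_wid = wid_m - wid_f + 1
--     las_hei = hei_m - hei_f + 1
--     if las_hei <= 0 or las_wid <= 0:
--         return []
--     row_windows = [[row[c:c + wid_f] for c in range(las_wid)] for row in board_matr]
--     return [([h, w], [wins[w] for wins in row_windows[h:h + hei_f]])
--             for h in range(las_hei) for w in range(las_wid)]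
-- ===== Notes on version B (the rewrite author's own statement) =====
-- stated objective: alternative
-- what changed: B first builds a table of every per-row horizontal window, then assembles each slice by indexing column w across a strip of that table (comprehensions/flatMap), instead of A's triple nested loop that re-slices the board rows for every (h,w) pair.
import Mathlib
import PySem

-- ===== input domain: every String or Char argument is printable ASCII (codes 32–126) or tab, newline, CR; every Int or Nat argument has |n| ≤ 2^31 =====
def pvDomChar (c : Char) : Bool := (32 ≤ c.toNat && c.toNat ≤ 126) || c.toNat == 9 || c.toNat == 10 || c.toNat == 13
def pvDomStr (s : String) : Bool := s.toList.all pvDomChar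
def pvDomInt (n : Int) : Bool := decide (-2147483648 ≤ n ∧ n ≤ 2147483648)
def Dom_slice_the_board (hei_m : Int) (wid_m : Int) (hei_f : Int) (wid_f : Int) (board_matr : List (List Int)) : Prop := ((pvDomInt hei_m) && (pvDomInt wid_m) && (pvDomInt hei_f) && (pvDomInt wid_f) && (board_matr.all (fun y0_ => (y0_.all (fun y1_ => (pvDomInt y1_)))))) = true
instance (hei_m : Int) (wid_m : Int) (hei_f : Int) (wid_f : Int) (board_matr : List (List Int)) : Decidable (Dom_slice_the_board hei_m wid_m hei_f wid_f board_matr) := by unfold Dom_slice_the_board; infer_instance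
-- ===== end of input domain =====

-- B precomputes all horizontal row windows once and assembles each slice by indexing
-- that table, instead of A's triple loop re-slicing the rows for every position (alternative decomposition).

-- ===== PORT A =====
def slice_the_board (hei_m : Int) (wid_m : Int) (hei_f : Int) (wid_f : Int) (board_matr : List (List Int)) : List (List Int × List (List Int)) :=
  let las_wid := wid_m - (wid_f - 1)
  let las_hei := hei_m - (hei_f - 1)
  (PySem.List.pyRange 0 las_hei 1).foldl (fun acc heigg =>
    (PySem.List.pyRange 0 las_wid 1).foldl (fun acc2 widd =>
      acc2 ++ [([heigg, widd],
        (PySem.List.slice board_matr (some heigg) (some (heigg + hei_f))).foldl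
          (fun sm sublist => sm ++ [PySem.List.slice sublist (some widd) (some (widd + wid_f))]) [])]) acc) []

-- ===== PORT B =====
-- wins[w] is ported as pyGetD with default []: w ranges over range(las_wid) and every
-- row of row_windows has exactly las_wid entries, so the index is provably in range.
def slice_the_board_alt (hei_m : Int) (wid_m : Int) (hei_f : Int) (wid_f : Int) (board_matr : List (List Int)) : List (List Int × List (List Int)) :=
  let las_wid := wid_m - wid_f + 1
  let las_hei := hei_m - hei_f + 1
  if las_hei ≤ 0 ∨ las_wid ≤ 0 then [] else
  let row_windows := board_matr.map (fun row =>
    (PySem.List.pyRange 0 las_wid 1).map (fun c => PySem.List.slice row (some c) (some (c + wid_f))))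
  (PySem.List.pyRange 0 las_hei 1).flatMap (fun h =>
    (PySem.List.pyRange 0 las_wid 1).map (fun w =>
      ([h, w],
        (PySem.List.slice row_windows (some h) (some (h + hei_f))).map
          (fun wins => PySem.List.pyGetD wins w []))))

-- ===== PRECONDITION & SPEC =====
def Spec_slice_the_board (hei_m : Int) (wid_m : Int) (hei_f : Int) (wid_f : Int) (board_matr : List (List Int)) (out : List (List Int × List (List Int))) : Prop := out = slice_the_board_alt hei_m wid_m hei_f wid_f board_matr
instance (hei_m : Int) (wid_m : Int) (hei_f : Int) (wid_f : Int) (board_matr : List (List Int)) (out : List (List Int × List (List Int))) : Decidable (Spec_slice_the_board hei_m wid_m hei_f wid_f board_matr out) := by unfold Spec_slice_the_board; infer_instance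

-- ===== CLAIM (what is proved, stated in full; the proofs are below) =====
def Claim_equal_slice_the_board : Prop := ∀ (hei_m : Int) (wid_m : Int) (hei_f : Int) (wid_f : Int) (board_matr : List (List Int)), Dom_slice_the_board hei_m wid_m hei_f wid_f board_matr → Spec_slice_the_board hei_m wid_m hei_f wid_f board_matr (slice_the_board hei_m wid_m hei_f wid_f board_matr)

-- ===== LEMMAS AND PROOFS =====

-- slice looks only at the length for its clamping, so it commutes with map.
theorem pv_slice_map {α β : Type} (F : α → β) (l : List α) (a? b? : Option Int) :
    PySem.List.slice (l.map F) a? b? = (PySem.List.slice l a? b?).map F := by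
  simp [PySem.List.slice, List.map_take, List.map_drop]

-- ===== VERDICT (by name: the statement is the Claim_ definition above) =====
theorem slice_the_board_spec : Claim_equal_slice_the_board := by
  intro hei_m wid_m hei_f wid_f board_matr _
  unfold Spec_slice_the_board slice_the_board slice_the_board_alt
  dsimp only
  by_cases hcase : hei_m - hei_f + 1 ≤ 0 ∨ wid_m - wid_f + 1 ≤ 0
  · rw [if_pos hcase]
    rcases hcase with hc | hc
    · rw [show hei_m - (hei_f - 1) = hei_m - hei_f + 1 from by ring,
        PySem.List.pyRange_one_eq_nil hc]
      rfl
    · rw [show wid_m - (wid_f - 1) = wid_m - wid_f + 1 from by ring,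
        PySem.List.pyRange_one_eq_nil hc]
      simp
  rw [if_neg hcase]
  simp only [PySem.List.foldl_append_singleton_eq_map, List.nil_append,
    PySem.List.foldl_append_eq_flatMap]
  have hlas : wid_m - (wid_f - 1) = wid_m - wid_f + 1 := by ring
  have hhei : hei_m - (hei_f - 1) = hei_m - hei_f + 1 := by ring
  rw [hlas, hhei]
  refine List.flatMap_congr ?_
  intro h _
  refine List.map_congr_left ?_
  intro w hw
  obtain ⟨hw0, hwlt⟩ := PySem.List.mem_pyRange_one.mp hw
  rw [pv_slice_map, List.map_map]
  refine congrArg _ (List.map_congr_left ?_)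
  intro sub _
  simp only [Function.comp]
  exact (PySem.List.pyGetD_map_pyRange_of_nonneg (fun c => PySem.List.slice sub (some c) (some (c + wid_f))) _ _ _ hw0 hwlt).symm
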